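-- pv_equiv track=rewrite | github.com/matteoprat/Py_Jewel_RPG | bejeweled_clone/pyjeweled.py | check_have_adjacent_rows
-- ===== SOURCE A (Python) =====
-- def check_have_adjacent_rows(grid):
--     ''' count if there are at least 3 adjacent gems of the same kind close to each other in rows '''
--     for line in grid:
--         equalcount = 1
--         last = ""
--         for c in line:
--             if c.lower() == last:
--                 equalcount += 1
--             else:
--                 equalcount = 1
--             if equalcount >= 3:
--                 return True
--             last = c.lower()
--     return False
-- ===== SOURCE B (Python) =====
-- def check_have_adjacent_rows(grid):
--     ''' count if there are at least 3 adjacent gems of the same kind close to each other in rows '''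
--     return any(
--         line[i].lower() == line[i + 1].lower() == line[i + 2].lower()
--         for line in grid
--         for i in range(len(line) - 2)
--     )
-- ===== Notes on version B (the rewrite author's own statement) =====
-- stated objective: simpler
-- what changed: B is a stateless brute-force window test: one any() over all (row, index) pairs checking whether the three cells of each length-3 window agree after lowercasing, replacing A's last/equalcount running-counter state machine with early returns.
-- intended difference: On grids where some row begins with two empty-string cells and no row contains three adjacent equal (lowercased) gems, A returns True because its last='' sentinel matches an empty gem, while B returns False, which is intended since no run of 3 equal gems exists. — e.g. on check_have_adjacent_rows([["", ""]]): A returns true, B returns false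
import Mathlib
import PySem

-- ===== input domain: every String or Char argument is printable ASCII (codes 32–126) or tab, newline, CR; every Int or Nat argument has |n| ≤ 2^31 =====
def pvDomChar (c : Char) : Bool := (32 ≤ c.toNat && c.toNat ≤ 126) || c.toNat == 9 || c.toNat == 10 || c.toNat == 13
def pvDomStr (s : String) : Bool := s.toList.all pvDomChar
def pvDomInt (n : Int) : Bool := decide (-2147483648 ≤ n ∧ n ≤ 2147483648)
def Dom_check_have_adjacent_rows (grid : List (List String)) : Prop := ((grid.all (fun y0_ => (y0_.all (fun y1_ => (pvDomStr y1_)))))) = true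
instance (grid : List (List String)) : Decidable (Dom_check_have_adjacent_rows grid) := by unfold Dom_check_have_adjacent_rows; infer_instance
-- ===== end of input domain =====

-- B replaces A's last/equalcount running-counter state machine by a stateless any() over all
-- length-3 windows of each row (objective: simpler); they differ only on the D_ region below.

-- ===== PORT A =====
-- inner 'for c in line' loop of A: state is (last, equalcount); returns the row's early-return value
def pvARow (last : String) (equalcount : Nat) : List String → Bool
  | [] => false
  | c :: rest =>
    let equalcount' := if (PySem.Str.lower c) == last then equalcount + 1 else 1
    if equalcount' ≥ 3 then true
    else pvARow (PySem.Str.lower c) equalcount' rest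

def check_have_adjacent_rows : List (List String) → Bool
  | [] => false
  | line :: rest =>
    if pvARow "" 1 line then true else check_have_adjacent_rows rest

-- ===== PORT B =====
-- Source B's flat generator: any over (line, i) with i in range(len(line)-2); chained '==' is
-- (x == y) and (y == z); list indices here are always in range, so getD is exact.
def check_have_adjacent_rows_alt (grid : List (List String)) : Bool :=
  grid.any (fun line =>
    (List.range (line.length - 2)).any (fun i =>
      (PySem.Str.lower (line.getD i "") == PySem.Str.lower (line.getD (i + 1) "")) &&
      (PySem.Str.lower (line.getD (i + 1) "") == PySem.Str.lower (line.getD (i + 2) ""))))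

-- ===== PRECONDITION & SPEC =====
abbrev lowS (s : String) : String := PySem.Str.lower s

-- "line has three adjacent cells (positions i, i+1, i+2) whose lowercased values coincide"
abbrev pvRowTriple (line : List String) : Prop :=
  ∃ i : Fin line.length, i.1 + 2 < line.length ∧
    lowS (line.getD (i.1 + 1) "") = lowS (line.getD i.1 "") ∧
    lowS (line.getD (i.1 + 2) "") = lowS (line.getD (i.1 + 1) "")

-- On grids where some row begins with two empty-string cells and no row contains three adjacent
-- equal (lowercased) gems, A returns true — its last = "" sentinel matches an empty gem — while
-- B returns false, which is the intended value: no run of 3 equal gems exists in such a grid.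
def D_check_have_adjacent_rows (grid : List (List String)) : Prop :=
  (∃ line ∈ grid, line.take 2 = ["", ""]) ∧ ¬ (∃ line ∈ grid, pvRowTriple line)
instance (grid : List (List String)) : Decidable (D_check_have_adjacent_rows grid) := by
  unfold D_check_have_adjacent_rows; infer_instance

def Spec_check_have_adjacent_rows (grid : List (List String)) (out : Bool) : Prop :=
  ¬ D_check_have_adjacent_rows grid → out = check_have_adjacent_rows_alt grid
instance (grid : List (List String)) (out : Bool) : Decidable (Spec_check_have_adjacent_rows grid out) := by
  unfold Spec_check_have_adjacent_rows; infer_instance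

def pvDiffWitness_check_have_adjacent_rows : List (List String) := [["", ""]]
def pvDiffWitnessOut_check_have_adjacent_rows : Bool × Bool := (true, false)

-- ===== CLAIM (what is proved, stated in full; the proofs are below) =====
def Claim_unchanged_check_have_adjacent_rows : Prop := ∀ (grid : List (List String)), Dom_check_have_adjacent_rows grid → Spec_check_have_adjacent_rows grid (check_have_adjacent_rows grid)
def Claim_changed_check_have_adjacent_rows : Prop := Dom_check_have_adjacent_rows (pvDiffWitness_check_have_adjacent_rows) ∧ D_check_have_adjacent_rows (pvDiffWitness_check_have_adjacent_rows) ∧ check_have_adjacent_rows (pvDiffWitness_check_have_adjacent_rows) = pvDiffWitnessOut_check_have_adjacent_rows.1 ∧ check_have_adjacent_rows_alt (pvDiffWitness_check_have_adjacent_rows) = pvDiffWitnessOut_check_have_adjacent_rows.2 ∧ pvDiffWitnessOut_check_have_adjacent_rows.1 ≠ pvDiffWitnessOut_check_have_adjacent_rows.2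
def Claim_exact_check_have_adjacent_rows : Prop := ∀ (grid : List (List String)), Dom_check_have_adjacent_rows grid → D_check_have_adjacent_rows grid → check_have_adjacent_rows grid ≠ check_have_adjacent_rows_alt grid

-- ===== LEMMAS AND PROOFS =====

def pvPair2 (k : String) (xs : List String) : Prop :=
  ∃ d e t, xs = d :: e :: t ∧ lowS d = k ∧ lowS e = k

theorem pvRowTriple_cons (x : String) (xs : List String) :
    pvRowTriple (x :: xs) ↔ pvPair2 (lowS x) xs ∨ pvRowTriple xs := by
  constructor
  · rintro ⟨⟨iv, hiv⟩, hlt, h1, h2⟩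
    simp only [List.length_cons] at hiv hlt
    cases iv with
    | zero =>
      left
      obtain ⟨d, e, t, rfl⟩ : ∃ d e t, xs = d :: e :: t := by
        cases xs with
        | nil => simp at hlt
        | cons d r =>
          cases r with
          | nil => simp at hlt
          | cons e t => exact ⟨d, e, t, rfl⟩
      simp only [List.getD_cons_zero, List.getD_cons_succ] at h1 h2
      exact ⟨d, e, t, rfl, h1, h2.trans h1⟩
    | succ j =>
      right
      refine ⟨⟨j, by omega⟩, by show j + 2 < xs.length; omega, ?_, ?_⟩
      · simpa [List.getD_cons_succ] using h1
      · simpa [List.getD_cons_succ] using h2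
  · rintro (⟨d, e, t, rfl, h1, h2⟩ | ⟨⟨iv, hiv⟩, hlt, h1, h2⟩)
    · exact ⟨⟨0, by simp⟩, by simp, by simpa using h1, by simpa [h1] using h2.trans h1.symm⟩
    · refine ⟨⟨iv + 1, by simp only [List.length_cons]; omega⟩, ?_, ?_, ?_⟩
      · show iv + 1 + 2 < xs.length + 1
        have : iv + 2 < xs.length := hlt
        omega
      · simpa [List.getD_cons_succ] using h1
      · simpa [List.getD_cons_succ] using h2

theorem pvRowTriple_nil : ¬ pvRowTriple ([] : List String) := by
  rintro ⟨i, h, -⟩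
  simp at h

theorem pvPair2_nil (k : String) : ¬ pvPair2 k [] := by
  rintro ⟨d, e, t, h, -⟩
  simp at h

theorem pvPair2_cons (k c : String) (rest : List String) :
    pvPair2 k (c :: rest) ↔ lowS c = k ∧ ∃ e t, rest = e :: t ∧ lowS e = k := by
  constructor
  · rintro ⟨d, e, t, h, h1, h2⟩
    obtain ⟨rfl, rfl⟩ : c = d ∧ rest = e :: t := by simpa using h
    exact ⟨h1, e, t, rfl, h2⟩
  · rintro ⟨h1, e, t, rfl, h2⟩
    exact ⟨c, e, t, rfl, h1, h2⟩

theorem pvARow_char (xs : List String) : ∀ last : String,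
    (pvARow last 1 xs = true ↔ pvRowTriple xs ∨ pvPair2 last xs) ∧
    (pvARow last 2 xs = true ↔ pvRowTriple xs ∨ ∃ c t, xs = c :: t ∧ lowS c = last) := by
  induction xs with
  | nil =>
    intro last
    constructor <;> simp [pvARow, pvRowTriple_nil, pvPair2_nil]
  | cons c rest ih =>
    intro last
    by_cases hl : lowS c = last
    · constructor
      · have : pvARow last 1 (c :: rest) = pvARow (lowS c) 2 rest := by
          simp [pvARow, hl]
        rw [this, (ih (lowS c)).2, pvRowTriple_cons, pvPair2_cons]
        subst hl
        constructor
        · rintro (h | ⟨e, t, rfl, he⟩)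
          · exact Or.inl (Or.inr h)
          · exact Or.inr ⟨rfl, e, t, rfl, he⟩
        · rintro ((⟨d, e, t, rfl, h1, h2⟩ | h) | ⟨-, e, t, rfl, he⟩)
          · exact Or.inr ⟨d, e :: t, rfl, h1⟩
          · exact Or.inl h
          · exact Or.inr ⟨e, t, rfl, he⟩
      · have : pvARow last 2 (c :: rest) = true := by
          simp [pvARow, hl]
        rw [this]
        simp only [true_iff]
        exact Or.inr ⟨c, rest, rfl, hl⟩
    · have hne : ((lowS c == last) = false) := by simp [hl]
      have step1 : pvARow last 1 (c :: rest) = pvARow (lowS c) 1 rest := by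
        simp [pvARow, hne]
      have step2 : pvARow last 2 (c :: rest) = pvARow (lowS c) 1 rest := by
        simp [pvARow, hne]
      have key : pvARow (lowS c) 1 rest = true ↔ pvRowTriple (c :: rest) := by
        rw [(ih (lowS c)).1, pvRowTriple_cons]
        exact or_comm
      constructor
      · rw [step1, key]
        have hp : ¬ pvPair2 last (c :: rest) := by
          rw [pvPair2_cons]
          rintro ⟨hc, -⟩
          exact hl hc
        constructor
        · exact fun h => Or.inl h
        · rintro (h | h)
          · exact h
          · exact absurd h hp
      · rw [step2, key]
        have hh : ¬ (∃ d t, (c :: rest : List String) = d :: t ∧ lowS d = last) := by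
          rintro ⟨d, t, heq, hd⟩
          cases heq
          exact hl hd
        constructor
        · exact fun h => Or.inl h
        · rintro (h | h)
          · exact h
          · exact absurd h hh

theorem pvLower_eq_empty (s : String) : lowS s = "" ↔ s = "" := by
  constructor
  · intro h
    have h1 : (lowS s).toList = [] := by rw [h]; rfl
    rw [PySem.Str.toList_lower] at h1
    have h2 : s.toList = [] := by simpa [PySem.Chars.lower] using h1
    exact String.toList_eq_nil_iff.1 h2
  · rintro rfl
    rfl

theorem pvPair2_empty (line : List String) :
    pvPair2 "" line ↔ line.take 2 = ["", ""] := by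
  constructor
  · rintro ⟨d, e, t, rfl, hd, he⟩
    rw [(pvLower_eq_empty d).1 hd, (pvLower_eq_empty e).1 he]
    rfl
  · intro h
    cases line with
    | nil => simp at h
    | cons d r =>
      cases r with
      | nil => simp at h
      | cons e t =>
        obtain ⟨rfl, rfl⟩ : d = "" ∧ e = "" := by simpa using h
        exact ⟨"", "", t, rfl, rfl, rfl⟩

theorem pvARow_top (line : List String) :
    pvARow "" 1 line = true ↔ pvRowTriple line ∨ line.take 2 = ["", ""] := by
  rw [(pvARow_char line "").1, pvPair2_empty]

theorem pvA_char (grid : List (List String)) :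
    check_have_adjacent_rows grid = true ↔
      ∃ line ∈ grid, pvRowTriple line ∨ line.take 2 = ["", ""] := by
  induction grid with
  | nil => simp [check_have_adjacent_rows]
  | cons l rest ih =>
    simp only [check_have_adjacent_rows]
    by_cases h : pvARow "" 1 l = true
    · simp only [h, if_true, true_iff]
      exact ⟨l, by simp, (pvARow_top l).1 h⟩
    · have h' : pvARow "" 1 l = false := by simpa using h
      simp only [h', Bool.false_eq_true, if_false]
      rw [ih]
      constructor
      · rintro ⟨x, hx, hp⟩
        exact ⟨x, by simp [hx], hp⟩
      · rintro ⟨x, hx, hp⟩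
        rcases List.mem_cons.1 hx with rfl | hx'
        · exact absurd ((pvARow_top x).2 hp) h
        · exact ⟨x, hx', hp⟩

theorem pvB_row (line : List String) :
    ((List.range (line.length - 2)).any (fun i =>
      (lowS (line.getD i "") == lowS (line.getD (i + 1) "")) &&
      (lowS (line.getD (i + 1) "") == lowS (line.getD (i + 2) "")))) = true ↔
    pvRowTriple line := by
  simp only [List.any_eq_true, List.mem_range, Bool.and_eq_true, beq_iff_eq]
  constructor
  · rintro ⟨i, hi, h1, h2⟩
    have h3 : i + 2 < line.length := by omega
    exact ⟨⟨i, by omega⟩, show i + 2 < line.length from h3, h1.symm, h2.symm⟩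
  · rintro ⟨⟨i, hi⟩, hlt, h1, h2⟩
    have h3 : i + 2 < line.length := hlt
    exact ⟨i, by omega, h1.symm, h2.symm⟩

theorem pvB_char (grid : List (List String)) :
    check_have_adjacent_rows_alt grid = true ↔ ∃ line ∈ grid, pvRowTriple line := by
  unfold check_have_adjacent_rows_alt
  rw [List.any_eq_true]
  exact exists_congr fun line => and_congr_right fun _ => pvB_row line

-- ===== VERDICT (by name: the statement is the Claim_ definition above) =====
theorem check_have_adjacent_rows_spec : Claim_unchanged_check_have_adjacent_rows := by
  intro grid _ hnd
  by_cases hq : ∃ line ∈ grid, pvRowTriple line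
  · have ha : check_have_adjacent_rows grid = true :=
      (pvA_char grid).2 (by obtain ⟨x, hx, hp⟩ := hq; exact ⟨x, hx, Or.inl hp⟩)
    have hb : check_have_adjacent_rows_alt grid = true := (pvB_char grid).2 hq
    exact ha.trans hb.symm
  · have hp : ¬ ∃ line ∈ grid, line.take 2 = ["", ""] := fun hp => hnd ⟨hp, hq⟩
    have ha : check_have_adjacent_rows grid = false := by
      cases hA : check_have_adjacent_rows grid
      · rfl
      · exfalso
        rcases (pvA_char grid).1 hA with ⟨x, hx, h | h⟩
        · exact hq ⟨x, hx, h⟩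
        · exact hp ⟨x, hx, h⟩
    have hb : check_have_adjacent_rows_alt grid = false := by
      cases hB : check_have_adjacent_rows_alt grid
      · rfl
      · exact absurd ((pvB_char grid).1 hB) hq
    exact ha.trans hb.symm

theorem check_have_adjacent_rows_changed : Claim_changed_check_have_adjacent_rows := by
  unfold Claim_changed_check_have_adjacent_rows
  exact ⟨by decide, by decide, by decide, by decide, by decide⟩

theorem check_have_adjacent_rows_tight : Claim_exact_check_have_adjacent_rows := by
  intro grid _ hd
  obtain ⟨hp, hq⟩ := hd
  have ha : check_have_adjacent_rows grid = true :=
    (pvA_char grid).2 (by obtain ⟨x, hx, h⟩ := hp; exact ⟨x, hx, Or.inr h⟩)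
  have hb : check_have_adjacent_rows_alt grid = false := by
    cases hB : check_have_adjacent_rows_alt grid
    · rfl
    · exact absurd ((pvB_char grid).1 hB) hq
  rw [ha, hb]
  simp
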